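-- pv_equiv track=rewrite | github.com/UnB-KnEDLe/experiments | members/lucelia/CRF/lines_to_sentences.py | filter_sentences
-- ===== SOURCE A (Python) =====
-- class LanguageDetector:
--     """Alterna a linguagem detectada só pra teste"""
--     def __init__(self):
--         self.l = True
--
--     def lang(self, sentence):
--         if self.l:
--             language = 'en'
--         else:
--             language = 'ko'
--         self.l = not self.l
--         return language
--
-- def filter_sentences(sentences, labels):
--     """
--     filtra pela linguagem
--     """
--     filtered_sentences = []
--     filtered_labels = []
--     ld = LanguageDetector()
--     for sentence, label in zip(sentences, labels):
--         if ld.lang(sentence) == 'en':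
--             filtered_sentences.append(sentence)
--             filtered_labels.append(label)
--     return filtered_sentences, filtered_labels
-- ===== SOURCE B (Python) =====
-- def filter_sentences(sentences, labels):
--     """
--     filtra pela linguagem
--     """
--     pairs = list(zip(sentences, labels))[::2]
--     filtered_sentences = [s for s, _ in pairs]
--     filtered_labels = [l for _, l in pairs]
--     return filtered_sentences, filtered_labels
-- ===== Notes on version B (the rewrite author's own statement) =====
-- stated objective: simpler
-- what changed: Replaced the stateful LanguageDetector toggle-and-branch loop with a stride-2 slice of the zipped pairs followed by two column projections.
import Mathlib
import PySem

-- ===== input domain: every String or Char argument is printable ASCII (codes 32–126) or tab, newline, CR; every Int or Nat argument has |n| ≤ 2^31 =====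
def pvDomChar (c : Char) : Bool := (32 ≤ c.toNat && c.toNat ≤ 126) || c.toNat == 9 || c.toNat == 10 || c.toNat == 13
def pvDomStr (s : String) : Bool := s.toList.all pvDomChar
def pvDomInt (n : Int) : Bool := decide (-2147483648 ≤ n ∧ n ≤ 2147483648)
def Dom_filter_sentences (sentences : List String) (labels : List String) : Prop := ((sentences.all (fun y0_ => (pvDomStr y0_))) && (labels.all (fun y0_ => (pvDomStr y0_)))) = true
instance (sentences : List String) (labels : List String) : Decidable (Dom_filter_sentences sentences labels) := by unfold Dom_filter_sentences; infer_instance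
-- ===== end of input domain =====

-- B replaces A's stateful LanguageDetector toggle-and-branch loop by a stride-2 slice of the
-- zipped pairs plus two column projections (objective: simpler).

-- ===== PORT A =====
-- LanguageDetector's only state is the Bool field `l` (starts True); `ld.lang(sentence)` returns
-- "en"/"ko" from it and toggles it, so the loop threads that Bool through the fold state.
def pvStepA (st : List String × List String × Bool) (p : String × String) :
    List String × List String × Bool :=
  let lang := if st.2.2 then "en" else "ko"     -- ld.lang(sentence), toggling self.l
  if lang == "en" then (st.1 ++ [p.1], st.2.1 ++ [p.2], !st.2.2)
  else (st.1, st.2.1, !st.2.2)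

def filter_sentences (sentences : List String) (labels : List String) :
    List String × List String :=
  let r := (sentences.zip labels).foldl pvStepA ([], [], true)
  (r.1, r.2.1)

-- ===== PORT B =====
def filter_sentences_alt (sentences : List String) (labels : List String) :
    List String × List String :=
  -- pairs = list(zip(sentences, labels))[::2]; step 2 ≠ 0, so slice? is always some (getD only totalizes)
  let pairs := (PySem.List.slice? (sentences.zip labels) none none 2).getD []
  (pairs.map (fun p => p.1), pairs.map (fun p => p.2))

-- ===== PRECONDITION & SPEC =====
def Spec_filter_sentences (sentences : List String) (labels : List String) (out : List String × List String) : Prop := out = filter_sentences_alt sentences labels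
instance (sentences : List String) (labels : List String) (out : List String × List String) : Decidable (Spec_filter_sentences sentences labels out) := by unfold Spec_filter_sentences; infer_instance

-- ===== CLAIM (what is proved, stated in full; the proofs are below) =====
def Claim_equal_filter_sentences : Prop := ∀ (sentences : List String) (labels : List String), Dom_filter_sentences sentences labels → Spec_filter_sentences sentences labels (filter_sentences sentences labels)

-- ===== LEMMAS AND PROOFS =====

-- every even-indexed element (indices 0, 2, 4, …)
def everyOther {α : Type} : List α → List α
  | [] => []
  | [a] => [a]
  | a :: _ :: xs => a :: everyOther xs

theorem filterMap_two_step {α : Type} (a b : α) (xs : List α) (m : Nat) :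
    (List.range (m + 1)).filterMap (fun (k : Nat) => (a :: b :: xs)[(2 * (k:Int)).toNat]?) =
      a :: (List.range m).filterMap (fun (k : Nat) => xs[(2 * (k:Int)).toNat]?) := by
  rw [List.range_succ_eq_map, List.filterMap_cons, List.filterMap_map]
  have h0 : ((2 : Int) * ((0:Nat):Int)).toNat = 0 := by omega
  simp only [h0]
  simp only [List.getElem?_cons_zero]
  congr 1

-- B's stride-2 slice computes exactly the even-indexed elements
theorem slice2_eq_everyOther {α : Type} : ∀ (xs : List α),
    PySem.List.slice? xs none none 2 = some (everyOther xs)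
  | [] => by simp [PySem.List.slice?, PySem.List.sliceIndices, everyOther]
  | [a] => by simp [PySem.List.slice?, PySem.List.sliceIndices, everyOther]
  | a :: b :: xs => by
      have ih := slice2_eq_everyOther xs
      norm_num [PySem.List.slice?, PySem.List.sliceIndices, everyOther] at ih ⊢
      have hc : (if 0 ≤ (xs.length:Int) + 1 then (((xs.length:Int) + 1 + 1 + 2 - 1)/2).toNat else 0)
          = (if 0 < xs.length then (((xs.length:Int) + 2 - 1)/2).toNat else 0) + 1 := by
        split_ifs <;> omega
      rw [hc]
      split_ifs at ih ⊢ with h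
      · rw [filterMap_two_step, ih]
      · simp at ih ⊢
        have hx : xs = [] := List.length_eq_zero_iff.mp (by omega)
        subst hx
        simp [everyOther] at ih ⊢

-- A's toggle loop appends exactly the even-indexed pairs, column-wise
theorem loopA_eq : ∀ (zs : List (String × String)) (fs ls : List String),
    ∃ bfin : Bool, zs.foldl pvStepA (fs, ls, true) =
      (fs ++ (everyOther zs).map (fun p => p.1), ls ++ (everyOther zs).map (fun p => p.2), bfin)
  | [], fs, ls => ⟨true, by simp [everyOther]⟩
  | [p], fs, ls => ⟨false, by simp [everyOther, pvStepA]⟩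
  | p :: q :: zs, fs, ls => by
      obtain ⟨bfin, ih⟩ := loopA_eq zs (fs ++ [p.1]) (ls ++ [p.2])
      exact ⟨bfin, by
        simp only [List.foldl_cons]
        show List.foldl pvStepA (pvStepA (pvStepA (fs, ls, true) p) q) zs = _
        simp only [pvStepA]
        norm_num
        rw [if_neg (by decide : ¬ ("ko" : String) = "en")]
        rw [ih]
        simp [everyOther]⟩

-- ===== VERDICT (by name: the statement is the Claim_ definition above) =====
theorem filter_sentences_spec : Claim_equal_filter_sentences := by
  intro sentences labels _
  unfold Spec_filter_sentences filter_sentences filter_sentences_alt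
  obtain ⟨bfin, h⟩ := loopA_eq (sentences.zip labels) [] []
  rw [h, slice2_eq_everyOther]
  simp
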